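-- pv_equiv track=rewrite | github.com/MinnKhantKyi/Python_Notes | octalConverter.py | modifyBiStr
-- ===== SOURCE A (Python) =====
-- def modifyBiStr(bi):
--
--     modBi = ''
--     l = list(bi)
--     length = len(l)
--     l.reverse()
--
--     if (length % 3) == 1:
--         l.append('0')
--         l.append('0')
--
--     elif (length % 3) == 2:
--         l.append('0')
--
--     l.reverse()
--
--     for i in range(len(l)):
--         modBi += str(l[i])
--
--     return modBi
-- ===== SOURCE B (Python) =====
-- def modifyBiStr(bi):
--     items = list(bi)
--     pad = (-len(items)) % 3
--     return '0' * pad + ''.join(str(x) for x in items)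
-- ===== Notes on version B (the rewrite author's own statement) =====
-- stated objective: simpler
-- what changed: Replaces the double reverse, conditional appends and per-character concatenation loop with a closed-form pad count (-len)%3 and a single string-repeat + join.
import Mathlib
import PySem

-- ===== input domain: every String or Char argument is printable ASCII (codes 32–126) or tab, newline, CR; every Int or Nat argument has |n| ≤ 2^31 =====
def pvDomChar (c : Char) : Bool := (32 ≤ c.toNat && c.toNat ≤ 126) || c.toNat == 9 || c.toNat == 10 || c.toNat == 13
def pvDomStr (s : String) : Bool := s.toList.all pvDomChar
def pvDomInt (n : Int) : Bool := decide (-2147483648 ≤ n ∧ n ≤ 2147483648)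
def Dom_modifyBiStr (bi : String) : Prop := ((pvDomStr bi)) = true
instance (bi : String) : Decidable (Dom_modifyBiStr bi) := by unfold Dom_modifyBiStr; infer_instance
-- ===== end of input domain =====

-- B left-pads with a closed-form (-len)%3 count instead of A's reverse/append/reverse + per-char loop.

-- ===== PORT A =====
def modifyBiStr (bi : String) : String :=
  let l := bi.toList
  let length := l.length
  let l := l.reverse
  let l := if length % 3 == 1 then l ++ ['0'] ++ ['0']
           else if length % 3 == 2 then l ++ ['0']
           else l
  let l := l.reverse
  (List.range l.length).foldl (fun modBi i => modBi ++ String.ofList [l[i]!]) ""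

-- ===== PORT B =====
def modifyBiStr_alt (bi : String) : String :=
  let items := bi.toList
  let pad := PySem.Int.mod (-(items.length : Int)) 3
  String.ofList (List.replicate pad.toNat '0') ++ String.ofList items

-- ===== PRECONDITION & SPEC =====
def Spec_modifyBiStr (bi : String) (out : String) : Prop := out = modifyBiStr_alt bi
instance (bi : String) (out : String) : Decidable (Spec_modifyBiStr bi out) := by unfold Spec_modifyBiStr; infer_instance

-- ===== CLAIM (what is proved, stated in full; the proofs are below) =====
def Claim_equal_modifyBiStr : Prop := ∀ (bi : String), Dom_modifyBiStr bi → Spec_modifyBiStr bi (modifyBiStr bi)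

-- ===== LEMMAS AND PROOFS =====

-- A's character-copy loop rebuilds the list as a string.
theorem pv_copy_loop (l : List Char) (n : Nat) (hn : n ≤ l.length) (s : String) :
    (List.range n).foldl (fun modBi i => modBi ++ String.ofList [l[i]!]) s
      = s ++ String.ofList (l.take n) := by
  induction n generalizing s with
  | zero => simp
  | succ k ih =>
    rw [List.range_succ, List.foldl_append]
    rw [ih (by omega)]
    simp only [List.foldl]
    have hk : k < l.length := by omega
    have : l.take (k + 1) = l.take k ++ [l[k]] := by
      rw [List.take_add_one]
      simp [List.getElem?_eq_getElem hk]
    rw [this, getElem!_pos l k hk]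
    apply String.ext
    simp

theorem pv_pad (n : Nat) :
    (PySem.Int.mod (-(n : Int)) 3).toNat
      = (if n % 3 == 1 then 2 else if n % 3 == 2 then 1 else 0) := by
  rw [PySem.Int.mod_eq_emod_of_pos (by norm_num)]
  have h3 : n % 3 < 3 := Nat.mod_lt _ (by norm_num)
  have he : (-(n : Int)) % 3 = ((3 - (n % 3 : Nat) : Int)) % 3 := by
    conv_lhs => rw [← Nat.div_add_mod n 3]
    push_cast
    omega
  interval_cases h : n % 3 <;> simp [he]

theorem modifyBiStr_eq (bi : String) : modifyBiStr bi = modifyBiStr_alt bi := by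
  unfold modifyBiStr modifyBiStr_alt
  simp only []
  set l := bi.toList with hl
  rw [pv_copy_loop _ _ (le_refl _)]
  rw [List.take_length, pv_pad]
  split_ifs with h1 h2 <;>
    simp_all [List.reverse_append, String.ext_iff]

-- ===== VERDICT (by name: the statement is the Claim_ definition above) =====
theorem modifyBiStr_spec : Claim_equal_modifyBiStr := by
  intro bi _
  exact modifyBiStr_eq bi
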